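-- pv_equiv track=rewrite | github.com/slipsnip/bitesofpy | 189/control_flow.py | filter_names
-- ===== SOURCE A (Python) =====
-- IGNORE_CHAR = 'b'
--
-- QUIT_CHAR = 'q'
--
-- MAX_NAMES = 5
--
-- def filter_names(names):
--     count = 0
--     for name in names:
--         if name[0] == IGNORE_CHAR or not name.isalpha():
--             continue
--         if name[0] == QUIT_CHAR or count == MAX_NAMES:
--             break
--         count += 1
--         yield name
-- ===== SOURCE B (Python) =====
-- IGNORE_CHAR = 'b'
--
-- QUIT_CHAR = 'q'
--
-- MAX_NAMES = 5
--
-- def filter_names(names):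
--     def take(eligible, k):
--         if k == 0:
--             return []
--         n = next(eligible, None)
--         if n is None or n[0] == QUIT_CHAR:
--             return []
--         return [n] + take(eligible, k - 1)
--     eligible = (n for n in names if n[0] != IGNORE_CHAR and n.isalpha())
--     yield from take(eligible, MAX_NAMES)
-- ===== Notes on version B (the rewrite author's own statement) =====
-- stated objective: alternative
-- what changed: A's single imperative loop with a counter and continue/break is replaced by a lazy eligible-name generator consumed by a small take recursion that stops at a quit name or after 5 takes.
import Mathlib
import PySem

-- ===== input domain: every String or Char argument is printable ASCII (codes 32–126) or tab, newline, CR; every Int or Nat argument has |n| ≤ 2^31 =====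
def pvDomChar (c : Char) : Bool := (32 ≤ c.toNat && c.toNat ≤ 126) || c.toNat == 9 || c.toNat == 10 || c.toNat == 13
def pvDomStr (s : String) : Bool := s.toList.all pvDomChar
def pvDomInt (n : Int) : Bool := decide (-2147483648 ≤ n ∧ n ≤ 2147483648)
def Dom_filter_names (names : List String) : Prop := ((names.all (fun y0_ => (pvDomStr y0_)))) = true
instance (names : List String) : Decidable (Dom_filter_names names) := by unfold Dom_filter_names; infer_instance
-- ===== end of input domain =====

-- B replaces A's imperative loop (counter + continue/break) by a lazy eligible-name stream
-- consumed by a small take recursion; same cost, different decomposition (objective: alternative).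

-- ===== PORT A =====
def filterNamesLoopA : List String → Int → List String
  | [], _ => []
  | name :: rest, count =>
    if PySem.Str.pyGet? name 0 = some 'b' ∨ ¬ PySem.Str.strIsalpha name then
      filterNamesLoopA rest count
    else if PySem.Str.pyGet? name 0 = some 'q' ∨ count = 5 then []
    else name :: filterNamesLoopA rest (count + 1)

def filter_names (names : List String) : List String := filterNamesLoopA names 0

-- ===== PORT B =====
-- Source B's `take` recursion over the lazy `eligible` generator; the generator is fused into the
-- recursion (pulling next(eligible) = scanning forward past non-eligible names), k checked first.
def pvTake : List String → Int → List String
  | [], _ => []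
  | n :: rest, k =>
    if k = 0 then []
    else if PySem.Str.pyGet? n 0 ≠ some 'b' ∧ PySem.Str.strIsalpha n then
      if PySem.Str.pyGet? n 0 = some 'q' then [] else n :: pvTake rest (k - 1)
    else pvTake rest k

def filter_names_alt (names : List String) : List String := pvTake names 5

-- ===== PRECONDITION & SPEC =====
-- Pre_ excludes exactly the inputs on which A raises IndexError: those whose first empty
-- string is actually reached by A's loop, i.e. the prefix before the first "" contains
-- neither six eligible (non-'b', alphabetic) names nor a quit-eligible name to break on.
def pvElig (n : String) : Bool := (PySem.Str.pyGet? n 0 != some 'b') && PySem.Str.strIsalpha n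
def Pre_filter_names (names : List String) : Prop :=
  "" ∉ names ∨
  6 ≤ ((names.takeWhile (fun n => n != "")).filter pvElig).length ∨
  ∃ n ∈ (names.takeWhile (fun n => n != "")).filter pvElig, PySem.Str.pyGet? n 0 = some 'q'
instance (names : List String) : Decidable (Pre_filter_names names) := by unfold Pre_filter_names; infer_instance

def pvWitness_filter_names : List String := (["alice", "bob", "carol", "q2", "dave"])

def Spec_filter_names (names : List String) (out : List String) : Prop := out = filter_names_alt names
instance (names : List String) (out : List String) : Decidable (Spec_filter_names names out) := by unfold Spec_filter_names; infer_instance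

-- ===== CLAIM (what is proved, stated in full; the proofs are below) =====
def Claim_equal_filter_names : Prop := ∀ (names : List String), Dom_filter_names names → Pre_filter_names names → Spec_filter_names names (filter_names names)

-- ===== LEMMAS AND PROOFS =====

-- A's loop with count already 5 never yields: every eligible name only breaks.
theorem pv_loopA_five : ∀ (l : List String), filterNamesLoopA l 5 = [] := by
  intro l
  induction l with
  | nil => rfl
  | cons name rest ih =>
    rw [filterNamesLoopA]
    by_cases hig : PySem.Str.pyGet? name 0 = some 'b' ∨ ¬ PySem.Str.strIsalpha name
    · simp only [if_pos hig]; exact ih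
    · simp only [if_neg hig]; simp

theorem pv_loop_eq_take : ∀ (names : List String) (c : Int), 0 ≤ c → c ≤ 5 →
    filterNamesLoopA names c = pvTake names (5 - c) := by
  intro names
  induction names with
  | nil => intro c _ _; rfl
  | cons name rest ih =>
    intro c hc0 hc5
    rw [filterNamesLoopA, pvTake]
    by_cases hc : c = 5
    · subst hc
      simp only [sub_self]
      by_cases hig : PySem.Str.pyGet? name 0 = some 'b' ∨ ¬ PySem.Str.strIsalpha name
      · simp only [if_pos hig]; simp [pv_loopA_five rest]
      · simp only [if_neg hig]; simp
    · have hk : ¬ (5 - c = 0) := by omega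
      simp only [if_neg hk]
      by_cases hig : PySem.Str.pyGet? name 0 = some 'b' ∨ ¬ PySem.Str.strIsalpha name
      · have h' : ¬ (PySem.Str.pyGet? name 0 ≠ some 'b' ∧ PySem.Str.strIsalpha name = true) := by
          tauto
        simp only [if_pos hig, if_neg h']
        exact ih c hc0 hc5
      · have h' : PySem.Str.pyGet? name 0 ≠ some 'b' ∧ PySem.Str.strIsalpha name = true := by
          tauto
        simp only [if_neg hig, if_pos h']
        by_cases hq : PySem.Str.pyGet? name 0 = some 'q'
        · simp only [if_pos (Or.inl hq), if_pos hq]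
        · have h2 : ¬ (PySem.Str.pyGet? name 0 = some 'q' ∨ c = 5) := by tauto
          simp only [if_neg h2, if_neg hq]
          have h3 : (5 : Int) - c - 1 = 5 - (c + 1) := by ring
          rw [h3, ih (c + 1) (by omega) (by omega)]

-- ===== VERDICT (by name: the statement is the Claim_ definition above) =====
theorem filter_names_spec : Claim_equal_filter_names := by
  intro names _ _
  unfold Spec_filter_names filter_names filter_names_alt
  have := pv_loop_eq_take names 0 (by omega) (by omega)
  simpa using this
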